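-- pv_equiv track=rewrite | github.com/LeeJuhae/Algorithm_study | monthly/2/4.py | solution
-- ===== SOURCE A (Python) =====
-- from itertools import combinations_with_replacement
--
-- def get_beauty(s):
-- 	if s.count(s[0]) == len(s):
-- 		return 0
-- 	start, end = 0, len(s)-1
-- 	while start < end:
-- 		if s[start] == s[end]:
-- 			end -= 1
-- 		else:
-- 			break
-- 	return end - start
--
-- def solution(s):
-- 	N = len(s)
-- 	answer = 0
-- 	if s.count(s[0]) == N:
-- 		return 0
-- 	arr = list(range(0, N))
-- 	comb = list(combinations_with_replacement(arr, 2))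
-- 	for c in comb:
-- 		start, end = c
-- 		answer += get_beauty(s[start:end+1])
-- 	return answer
-- ===== SOURCE B (Python) =====
-- def solution(s):
--     N = len(s)
--     total = 0
--     for start in range(N):
--         last = start
--         for end in range(start, N):
--             if s[end] != s[start]:
--                 last = end
--             total += last - start
--     return total
-- ===== Notes on version B (the rewrite author's own statement) =====
-- stated objective: faster
-- what changed: Instead of enumerating all O(N^2) substrings and rescanning each from its right end (O(N^3)), B fixes each start and extends the end one character at a time, maintaining the last index differing from s[start] incrementally, summing all contributions in one O(N^2) pass.
import Mathlib
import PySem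

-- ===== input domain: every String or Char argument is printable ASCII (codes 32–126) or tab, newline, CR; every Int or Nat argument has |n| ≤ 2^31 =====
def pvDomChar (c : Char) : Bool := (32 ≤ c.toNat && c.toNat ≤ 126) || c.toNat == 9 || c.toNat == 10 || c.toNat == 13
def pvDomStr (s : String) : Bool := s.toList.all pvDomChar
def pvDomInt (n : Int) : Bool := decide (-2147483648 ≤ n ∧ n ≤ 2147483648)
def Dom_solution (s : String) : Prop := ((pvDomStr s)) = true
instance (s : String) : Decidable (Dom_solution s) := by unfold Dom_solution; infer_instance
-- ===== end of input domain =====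

-- B replaces A's enumeration of all substrings with a per-start incremental scan that
-- maintains the last index differing from s[start]; same values, fewer passes (objective: faster).

-- ===== PORT A =====
-- get_beauty's while loop: start fixed, end walks left while chars match
def getBeautyLoop (t : List Char) (start e : Nat) : Nat :=
  if h : start < e then
    if t.getD e ' ' == t.getD start ' ' then getBeautyLoop t start (e - 1) else e
  else e
termination_by e
decreasing_by omega

def getBeauty (t : List Char) : Int :=
  if t.count (t.getD 0 ' ') == t.length then 0
  else (getBeautyLoop t 0 (t.length - 1) : Int) - 0

def solution (s : String) : Int :=
  let cs := s.toList
  let N := cs.length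
  let answer : Int := 0
  if cs.count (cs.getD 0 ' ') == N then 0
  else
    let arr := List.range N
    -- combinations_with_replacement(arr, 2): pairs (i, j) with i ≤ j, lexicographic
    let comb := arr.flatMap (fun i => ((List.range N).filter (fun j => decide (i ≤ j))).map (fun j => (i, j)))
    comb.foldl (fun acc c =>
      acc + getBeauty (PySem.List.slice cs (some (c.1 : Int)) (some ((c.2 : Int) + 1)))) answer

-- ===== PORT B =====
def solution_alt (s : String) : Int :=
  let cs := s.toList
  let N := cs.length
  (List.range N).foldl (fun total start =>
    ((List.range' start (N - start)).foldl
      (fun (p : Nat × Int) e =>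
        let last := if cs.getD e ' ' != cs.getD start ' ' then e else p.1
        (last, p.2 + ((last : Int) - (start : Int))))
      (start, total)).2) 0

-- ===== PRECONDITION & SPEC =====
-- Pre_ excludes only the empty string, on which A raises IndexError at s[0].
def Pre_solution (s : String) : Prop := s ≠ ""
instance (s : String) : Decidable (Pre_solution s) := by unfold Pre_solution; infer_instance
def pvWitness_solution : String := "ab"

def Spec_solution (s : String) (out : Int) : Prop := out = solution_alt s
instance (s : String) (out : Int) : Decidable (Spec_solution s out) := by unfold Spec_solution; infer_instance

-- ===== CLAIM (what is proved, stated in full; the proofs are below) =====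
def Claim_equal_solution : Prop := ∀ (s : String), Dom_solution s → Pre_solution s → Spec_solution s (solution s)

-- ===== LEMMAS AND PROOFS =====

-- the last index ≤ e whose char differs from cs[start], or start if none
def lastD (cs : List Char) (start : Nat) : Nat → Nat
  | 0 => start
  | e + 1 =>
    if e + 1 ≤ start then start
    else if cs.getD (e + 1) ' ' ≠ cs.getD start ' ' then e + 1 else lastD cs start e

-- per-start contribution, the common value both programs sum
def SS (cs : List Char) (N i : Nat) : Int :=
  ((List.range (N - i)).map (fun k => ((lastD cs i (i + k) : Int) - (i : Int)))).sum

theorem lastD_le_start (cs : List Char) (start e : Nat) (h : e ≤ start) :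
    lastD cs start e = start := by
  cases e with
  | zero => rfl
  | succ e => simp [lastD, h]

theorem lastD_step (cs : List Char) (start m : Nat) :
    lastD cs start (start + m) =
      if cs.getD (start + m) ' ' ≠ cs.getD start ' ' then start + m
      else lastD cs start (start + m - 1) := by
  cases m with
  | zero =>
    simp [lastD_le_start cs start start le_rfl,
          lastD_le_start cs start (start - 1) (Nat.sub_le _ _)]
  | succ m =>
    have : start + (m + 1) = (start + m) + 1 := by omega
    rw [this]
    have hns : ¬ (start + m + 1 ≤ start) := by omega
    simp only [lastD, hns, if_false]
    congr 1

-- B's inner loop: tracks lastD and accumulates the per-end contributions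
theorem inner_loop (cs : List Char) (start : Nat) :
    ∀ (m : Nat) (total : Int),
      (List.range' start m).foldl
        (fun (p : Nat × Int) e =>
          let last := if cs.getD e ' ' != cs.getD start ' ' then e else p.1
          (last, p.2 + ((last : Int) - (start : Int))))
        (start, total)
      = (lastD cs start (start + m - 1),
         total + ((List.range m).map (fun k => ((lastD cs start (start + k) : Int) - (start : Int)))).sum) := by
  intro m
  induction m with
  | zero =>
    intro total
    rw [lastD_le_start cs start (start + 0 - 1) (by omega)]
    simp
  | succ m ih =>
    intro total
    rw [List.range'_1_concat, List.foldl_append, ih total, List.foldl_cons, List.foldl_nil]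
    have hlast : (if cs.getD (start + m) ' ' != cs.getD start ' '
                    then start + m else lastD cs start (start + m - 1))
        = lastD cs start (start + m) := by
      rw [lastD_step]
      simp [bne_iff_ne]
    simp only [hlast]
    rw [Prod.mk.injEq]
    refine ⟨by rw [show start + (m + 1) - 1 = start + m by omega], ?_⟩
    rw [List.range_succ, List.map_append, List.sum_append]
    simp [add_assoc]

theorem filter_range_eq_range' (i : Nat) :
    ∀ N, (List.range N).filter (fun j => decide (i ≤ j)) = List.range' i (N - i) := by
  intro N
  induction N with
  | zero => simp
  | succ N ih =>
    rw [List.range_succ, List.filter_append, ih]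
    by_cases h : i ≤ N
    · have h1 : N + 1 - i = (N - i) + 1 := by omega
      have h2 : i + (N - i) = N := by omega
      rw [h1, List.range'_1_concat, h2]
      simp [h]
    · have h1 : N + 1 - i = 0 := by omega
      have h2 : N - i = 0 := by omega
      simp [h, h1, h2]

-- elements of the sliced substring, read back in cs
theorem slice_getD (cs : List Char) (i j k : Nat) (hj : j < cs.length) (hk : k < j + 1 - i) :
    ((cs.drop i).take (j + 1 - i)).getD k ' ' = cs.getD (i + k) ' ' := by
  have h1 : k < (cs.drop i).length := by simp; omega
  have h2 : i + k < cs.length := by omega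
  rw [List.getD_eq_getElem _ _ (by simp; omega), List.getD_eq_getElem _ _ h2]
  rw [List.getElem_take, List.getElem_drop]

theorem slice_length (cs : List Char) (i j : Nat) (_hij : i ≤ j) (hj : j < cs.length) :
    ((cs.drop i).take (j + 1 - i)).length = j + 1 - i := by
  simp; omega

-- A's while loop equals lastD, transported through the slice
theorem loop_eq_lastD (cs : List Char) (i j : Nat) (hij : i ≤ j) (hj : j < cs.length) :
    ∀ e, i + e ≤ j →
      getBeautyLoop ((cs.drop i).take (j + 1 - i)) 0 e + i = lastD cs i (i + e) := by
  intro e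
  induction e with
  | zero =>
    intro _
    rw [getBeautyLoop]
    simp [lastD_le_start cs i i le_rfl]
  | succ e ih =>
    intro he
    rw [getBeautyLoop]
    have h0 : (0 : Nat) < e + 1 := by omega
    simp only [h0, dif_pos]
    have ht0 : ((cs.drop i).take (j + 1 - i)).getD 0 ' ' = cs.getD i ' ' := by
      have := slice_getD cs i j 0 hj (by omega); simpa using this
    have hte : ((cs.drop i).take (j + 1 - i)).getD (e + 1) ' ' = cs.getD (i + (e + 1)) ' ' :=
      slice_getD cs i j (e + 1) hj (by omega)
    rw [ht0, hte]
    have hstep := lastD_step cs i (e + 1)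
    by_cases hc : cs.getD (i + (e + 1)) ' ' = cs.getD i ' '
    · simp only [hc, beq_self_eq_true, if_true]
      have h1 : e + 1 - 1 = e := by omega
      rw [h1, ih (by omega), hstep, if_neg (not_not_intro hc),
         show i + (e + 1) - 1 = i + e by omega]
    · have hbe : (cs.getD (i + (e + 1)) ' ' == cs.getD i ' ') = false := by
        rw [beq_eq_false_iff_ne]; exact hc
      rw [hbe]
      simp only [Bool.false_eq_true, if_false]
      rw [hstep, if_pos hc]
      omega

-- when every char up to e matches cs[i], lastD stays at i
theorem lastD_all_eq (cs : List Char) (i : Nat) :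
    ∀ e, (∀ k, k ≤ e → cs.getD (i + k) ' ' = cs.getD i ' ') → lastD cs i (i + e) = i := by
  intro e
  induction e with
  | zero => intro _; exact lastD_le_start cs i (i + 0) (by omega)
  | succ e ih =>
    intro h
    rw [lastD_step]
    have hc : cs.getD (i + (e + 1)) ' ' = cs.getD i ' ' := h (e + 1) le_rfl
    simp only [hc, ne_eq, not_true_eq_false, if_false]
    have : i + (e + 1) - 1 = i + e := by omega
    rw [this]
    exact ih (fun k hk => h k (by omega))

theorem getBeauty_slice (cs : List Char) (i j : Nat) (hij : i ≤ j) (hj : j < cs.length) :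
    getBeauty (PySem.List.slice cs (some (i : Int)) (some ((j : Int) + 1)))
      = (lastD cs i j : Int) - (i : Int) := by
  have hcast : ((j : Int) + 1) = ((j + 1 : Nat) : Int) := by push_cast; ring
  rw [hcast, PySem.List.slice_natCast]
  set t := (cs.drop i).take (j + 1 - i) with ht
  have hlen : t.length = j + 1 - i := slice_length cs i j hij hj
  rw [getBeauty]
  by_cases hall : t.count (t.getD 0 ' ') = t.length
  · -- all chars of the substring equal its first: beauty 0, and lastD cs i j = i
    have hmem : ∀ x ∈ t, x = t.getD 0 ' ' := by
      intro x hx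
      exact ((List.count_eq_length).1 hall x hx).symm
    have hk : ∀ k, k ≤ j - i → cs.getD (i + k) ' ' = cs.getD i ' ' := by
      intro k hk
      have hk' : k < j + 1 - i := by omega
      have h0' : (0 : Nat) < j + 1 - i := by omega
      have e1 : t.getD k ' ' = cs.getD (i + k) ' ' := slice_getD cs i j k hj hk'
      have e0 : t.getD 0 ' ' = cs.getD (i + 0) ' ' := slice_getD cs i j 0 hj h0'
      have m1 : t.getD k ' ' ∈ t := by
        rw [List.getD_eq_getElem _ _ (by omega)]; exact List.getElem_mem _
      have := hmem _ m1
      rw [e1] at this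
      rw [this, e0]
      simp
    have hl : lastD cs i j = i := by
      have : i + (j - i) = j := by omega
      rw [← this]
      exact lastD_all_eq cs i (j - i) hk
    have hbe : (t.count (t.getD 0 ' ') == t.length) = true := by
      rw [beq_iff_eq]; exact hall
    rw [hbe, if_pos rfl, hl]
    simp
  · have hne : (t.count (t.getD 0 ' ') == t.length) = false := by
      rw [beq_eq_false_iff_ne]; exact hall
    rw [hne]
    simp only [Bool.false_eq_true, if_false]
    have hloop := loop_eq_lastD cs i j hij hj (j - i) (by omega)
    have hidx : i + (j - i) = j := by omega
    rw [hidx] at hloop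
    rw [hlen]
    have : j + 1 - i - 1 = j - i := by omega
    rw [this]
    rw [← ht] at hloop
    omega

-- B equals the double sum of per-start contributions
theorem alt_eq_sum (s : String) :
    solution_alt s = ((List.range s.toList.length).map (SS s.toList s.toList.length)).sum := by
  rw [solution_alt]
  simp only
  have hfun : (fun (total : Int) (start : Nat) =>
      ((List.range' start (s.toList.length - start)).foldl
        (fun (p : Nat × Int) e =>
          let last := if s.toList.getD e ' ' != s.toList.getD start ' ' then e else p.1
          (last, p.2 + ((last : Int) - (start : Int))))
        (start, total)).2)
      = (fun total start => total + SS s.toList s.toList.length start) := by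
    funext total start
    rw [inner_loop]
    rfl
  rw [hfun, PySem.List.foldl_add]
  simp

-- sum distributes over flatMap
theorem sum_flatMap_int {α : Type} (l : List α) (g : α → List Int) :
    (l.flatMap g).sum = (l.map (fun x => (g x).sum)).sum := by
  induction l with
  | nil => simp
  | cons x xs ih => simp [List.flatMap_cons, ih]

theorem solution_spec_aux (s : String) (hs : s ≠ "") :
    solution s = solution_alt s := by
  rw [alt_eq_sum, solution]
  simp only
  set cs := s.toList with hcs
  set N := cs.length with hN
  have hne0 : s.toList ≠ [] := by simpa using hs
  have hN0 : 0 < N := by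
    rw [hN, hcs]
    exact List.length_pos_iff.2 hne0
  by_cases hall : cs.count (cs.getD 0 ' ') = N
  · -- all characters equal: A returns 0, and every summand of B is 0
    have hmem : ∀ x ∈ cs, x = cs.getD 0 ' ' := by
      intro x hx
      exact ((List.count_eq_length).1 (by rw [hall, hN]) x hx).symm
    have hzero : ∀ i ∈ List.range N, SS cs N i = 0 := by
      intro i hi
      rw [List.mem_range] at hi
      rw [SS]
      have hterm : ∀ k ∈ List.range (N - i), ((lastD cs i (i + k) : Int) - (i : Int)) = 0 := by
        intro k hk
        rw [List.mem_range] at hk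
        have hl : lastD cs i (i + k) = i := by
          apply lastD_all_eq
          intro k' hk'
          have h1 : i + k' < N := by omega
          have e1 : cs.getD (i + k') ' ' = cs.getD 0 ' ' := by
            rw [List.getD_eq_getElem _ _ (by omega)]
            exact hmem _ (List.getElem_mem _)
          have e2 : cs.getD i ' ' = cs.getD 0 ' ' := by
            rw [List.getD_eq_getElem _ _ (by omega)]
            exact hmem _ (List.getElem_mem _)
          rw [e1, e2]
        simp [hl]
      rw [List.map_congr_left hterm]
      simp
    have hbe : (cs.count (cs.getD 0 ' ') == N) = true := by
      rw [beq_iff_eq]; exact hall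
    rw [List.map_congr_left hzero, hbe, if_pos rfl]
    simp
  · have hne : (cs.count (cs.getD 0 ' ') == N) = false := by
      rw [beq_eq_false_iff_ne]; exact hall
    rw [hne]
    simp only [Bool.false_eq_true, if_false]
    rw [PySem.List.foldl_add, List.map_flatMap]
    rw [sum_flatMap_int]
    simp only [zero_add]
    congr 1
    apply List.map_congr_left
    intro i hi
    rw [List.mem_range] at hi
    rw [filter_range_eq_range', List.map_map, List.range'_eq_map_range, List.map_map]
    rw [SS]
    apply congrArg
    apply List.map_congr_left
    intro k hk
    rw [List.mem_range] at hk
    simp only [Function.comp]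
    exact getBeauty_slice cs i (i + k) (by omega) (by omega)

-- ===== VERDICT (by name: the statement is the Claim_ definition above) =====
theorem solution_spec : Claim_equal_solution := by
  intro s _ hpre
  unfold Spec_solution
  exact solution_spec_aux s hpre
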